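-- pv_equiv track=rewrite | github.com/gao-gao-zai/GTBot | plugins/GTBot/tools/outgoing_forbidden_word_audit/__init__.py | _find_matched_terms
-- ===== SOURCE A (Python) =====
-- from collections.abc import Iterable, Sequence
--
-- _FORBIDDEN_TERMS = (
--     ("逆向", "逆向"),
--     ("注册机", "注册机"),
--     ("js算法分析", "js算法分析"),
--     ("ddos", "ddos"),
--     ("cc", "cc"),
-- )
--
-- def _contains_ascii_term(text: str, term: str) -> bool:
--     """按 ASCII 单词边界判断英文违禁词是否命中。
--
--     `ddos` 与 `cc` 这类纯英文缩写容易误命中更长单词，因此这里要求其左右两侧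
--     不是英文字母或数字；中文词仍按普通子串匹配处理。
--
--     Args:
--         text: 待检查文本，调用方会先传入小写版本。
--         term: 待匹配的英文违禁词，同样使用小写。
--
--     Returns:
--         当文本中存在独立的英文违禁词时返回 `True`，否则返回 `False`。
--     """
--
--     start = 0
--     term_length = len(term)
--     while True:
--         index = text.find(term, start)
--         if index < 0:
--             return False
--         left = text[index - 1] if index > 0 else ""
--         right_index = index + term_length
--         right = text[right_index] if right_index < len(text) else ""
--         if not left.isalnum() and not right.isalnum():
--             return True
--         start = index + 1
--
-- def _find_matched_terms(fragments: Sequence[str]) -> list[str]: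
--     """在文本片段列表中查找所有命中的违禁词。
--
--     中文词按原样子串匹配，英文缩写使用不区分大小写的边界匹配。返回结果会按配置
--     顺序去重，方便日志里稳定展示。
--
--     Args:
--         fragments: 已从待发送负载中展开得到的文本片段序列。
--
--     Returns:
--         list[str]: 本次命中的违禁词列表；未命中时返回空列表。
--     """
--
--     matched: list[str] = []
--     for display, needle in _FORBIDDEN_TERMS:
--         normalized_needle = needle.lower()
--         for fragment in fragments:
--             normalized_fragment = fragment.lower()
--             if needle.isascii():
--                 if _contains_ascii_term(normalized_fragment, normalized_needle):
--                     matched.append(display)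
--                     break
--             elif normalized_needle in normalized_fragment:
--                 matched.append(display)
--                 break
--     return matched
-- ===== SOURCE B (Python) =====
-- _FORBIDDEN_TERMS = (
--     ("逆向", "逆向"),
--     ("注册机", "注册机"),
--     ("js算法分析", "js算法分析"),
--     ("ddos", "ddos"),
--     ("cc", "cc"),
-- )
--
--
-- def _word_set(lows):
--     """All maximal alphanumeric runs ("words") across the lowered fragments.
--
--     An occurrence of a fully-alphanumeric term whose two neighbours are
--     non-alphanumeric (or the string edge) is exactly a maximal alphanumeric
--     run equal to the term, so word-boundary matching for such terms reduces
--     to membership in this set.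
--     """
--     words = set()
--     for low in lows:
--         run = []
--         for ch in low:
--             if ch.isalnum():
--                 run.append(ch)
--             else:
--                 if run:
--                     words.add("".join(run))
--                     run = []
--         if run:
--             words.add("".join(run))
--     return words
--
--
-- def _find_matched_terms(fragments):
--     # Tokenize once: every ASCII needle in the config is a plain alphanumeric
--     # word, so its boundary-aware hit test is just set membership; non-ASCII
--     # needles keep the plain substring test.
--     lows = [fragment.lower() for fragment in fragments]
--     words = _word_set(lows)
--     return [
--         display
--         for display, needle in _FORBIDDEN_TERMS
--         if (needle.lower() in words
--             if needle.isascii()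
--             else any(needle.lower() in low for low in lows))
--     ]
-- ===== Notes on version B (the rewrite author's own statement) =====
-- stated objective: alternative
-- what changed: A runs a find-and-skip while-loop per (term, fragment) pair with word-boundary checks at each found index; B instead tokenizes the lowered fragments once into the set of maximal alphanumeric runs and decides each ASCII term by set membership (valid because every ASCII needle in the config is a plain alphanumeric word), keeping the substring test only for non-ASCII needles.
import Mathlib
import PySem

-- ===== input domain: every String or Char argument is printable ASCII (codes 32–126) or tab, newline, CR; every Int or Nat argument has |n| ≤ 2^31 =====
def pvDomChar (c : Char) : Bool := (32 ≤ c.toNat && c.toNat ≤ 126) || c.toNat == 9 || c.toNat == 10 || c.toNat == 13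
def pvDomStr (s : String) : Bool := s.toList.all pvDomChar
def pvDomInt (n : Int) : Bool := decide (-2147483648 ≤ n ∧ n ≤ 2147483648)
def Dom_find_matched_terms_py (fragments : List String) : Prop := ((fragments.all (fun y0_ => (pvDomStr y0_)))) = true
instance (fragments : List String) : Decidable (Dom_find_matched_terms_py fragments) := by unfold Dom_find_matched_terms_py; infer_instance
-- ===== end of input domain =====

-- B replaces A's per-(term, fragment) find-and-skip boundary scan by one tokenization pass:
-- the lowered fragments are split once into the set of their maximal alphanumeric runs, and
-- each ASCII needle (all of which are plain alphanumeric words) is decided by set membership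
-- (objective: alternative algorithm).

-- shared module constant _FORBIDDEN_TERMS
def pvForbiddenTerms : List (String × String) :=
  [("逆向", "逆向"), ("注册机", "注册机"), ("js算法分析", "js算法分析"), ("ddos", "ddos"), ("cc", "cc")]

-- str.isascii(): every code point < 128 (exact; empty string is True)
def pvIsAscii (s : String) : Bool := s.toList.all (fun c => c.toNat < 128)

-- ===== PORT A =====
-- `left`/`right` in A are "" (empty string) at the edges, a 1-char string otherwise; ""
-- is not alnum, so they are Option Char with this isalnum (exact)
def pvIsalnumOpt : Option Char → Bool
  | some c => PySem.Chars.isalnum c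
  | none => false

-- _contains_ascii_term's while-loop; fuel bounds the iteration count (start strictly
-- increases each round and find returns -1 once start passes len(text)), so
-- text.length + 2 fuel is always enough and the 0-fuel branch is unreachable.
def pvContainsGo (text term : List Char) : Nat → Int → Bool
  | 0, _ => false
  | fuel+1, start =>
    let index := PySem.Chars.findFrom text term start none
    if index < 0 then false
    else
      let left := if 0 < index then PySem.List.pyGet? text (index - 1) else none
      let rightIndex := index + (term.length : Int)
      let right := if rightIndex < (text.length : Int) then PySem.List.pyGet? text rightIndex else none
      if !pvIsalnumOpt left && !pvIsalnumOpt right then true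
      else pvContainsGo text term fuel (index + 1)

def pvContainsAsciiTerm (text term : String) : Bool :=
  pvContainsGo text.toList term.toList (text.toList.length + 2) 0

-- A's inner 'for fragment … append; break' loop: stop at the first hitting fragment
def pvInnerA (needle nneedle : String) : List String → Bool
  | [] => false
  | fragment :: rest =>
    let nf := PySem.Str.lower fragment
    if pvIsAscii needle then
      if pvContainsAsciiTerm nf nneedle then true else pvInnerA needle nneedle rest
    else if PySem.Str.isIn nneedle nf then true else pvInnerA needle nneedle rest

def find_matched_terms_py (fragments : List String) : List String :=
  pvForbiddenTerms.foldl
    (fun matched dn =>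
      let nneedle := PySem.Str.lower dn.2
      if pvInnerA dn.2 nneedle fragments then matched ++ [dn.1] else matched)
    []

-- ===== PORT B =====
-- Source B's _word_set loop body over one character: state = (words so far, current run)
def pvWordStep (st : PySem.Set String × List Char) (ch : Char) : PySem.Set String × List Char :=
  if PySem.Chars.isalnum ch then (st.1, st.2 ++ [ch])
  else if st.2.isEmpty then st else (PySem.Set.add st.1 (String.ofList st.2), [])

-- Source B's _word_set body for one lowered fragment (run flushed at the end)
def pvWordsOfLow (words : PySem.Set String) (low : String) : PySem.Set String :=
  let st := low.toList.foldl pvWordStep (words, [])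
  if st.2.isEmpty then st.1 else PySem.Set.add st.1 (String.ofList st.2)

-- Source B's _word_set: all maximal alphanumeric runs across the lowered fragments
def pvWordSet (lows : List String) : PySem.Set String :=
  lows.foldl pvWordsOfLow PySem.Set.empty

def find_matched_terms_py_alt (fragments : List String) : List String :=
  let lows := fragments.map PySem.Str.lower
  let words := pvWordSet lows
  (pvForbiddenTerms.filter (fun dn =>
      if pvIsAscii dn.2 then PySem.Set.contains words (PySem.Str.lower dn.2)
      else lows.any (fun low => PySem.Str.isIn (PySem.Str.lower dn.2) low))).map (fun dn => dn.1)

-- ===== PRECONDITION & SPEC =====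
def Spec_find_matched_terms_py (fragments : List String) (out : List String) : Prop := out = find_matched_terms_py_alt fragments
instance (fragments : List String) (out : List String) : Decidable (Spec_find_matched_terms_py fragments out) := by unfold Spec_find_matched_terms_py; infer_instance

-- ===== CLAIM (what is proved, stated in full; the proofs are below) =====
def Claim_equal_find_matched_terms_py : Prop := ∀ (fragments : List String), Dom_find_matched_terms_py fragments → Spec_find_matched_terms_py fragments (find_matched_terms_py fragments)

-- ===== LEMMAS AND PROOFS =====

-- proof-side spec of Source B's run splitting: the maximal alphanumeric runs of `run ++ cs`,
-- where `run` is the (alphanumeric) run already open on the left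
def pvTokens : List Char → List Char → List (List Char)
  | run, [] => if run = [] then [] else [run]
  | run, c :: cs =>
    if PySem.Chars.isalnum c then pvTokens (run ++ [c]) cs
    else (if run = [] then [] else [run]) ++ pvTokens [] cs

-- an occurrence of `term` in `text` whose two neighbours are non-alphanumeric or the edge
def pvOcc (term text : List Char) : Prop :=
  ∃ l r, text = l ++ term ++ r ∧
    (∀ c, l.getLast? = some c → PySem.Chars.isalnum c = false) ∧
    (∀ c, r.head? = some c → PySem.Chars.isalnum c = false)

-- the same occurrence, by start index (the form A's find-loop produces)
def pvOccAt (term text : List Char) (i : Nat) : Prop :=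
  term <+: text.drop i ∧
  (i = 0 ∨ ∃ c, text[i-1]? = some c ∧ PySem.Chars.isalnum c = false) ∧
  (text.length ≤ i + term.length ∨ ∃ c, text[i + term.length]? = some c ∧ PySem.Chars.isalnum c = false)

theorem pv_eq_nil_or_append {α : Type} (l : List α) : l = [] ∨ ∃ l' a, l = l' ++ [a] := by
  rcases List.eq_nil_or_concat l with h | ⟨l', a, h⟩
  · exact Or.inl h
  · exact Or.inr ⟨l', a, by rw [h, List.concat_eq_append]⟩

theorem pvOccAt_iff_pvOcc (term text : List Char) (hne : term ≠ []) :
    (∃ i, pvOccAt term text i) ↔ pvOcc term text := by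
  constructor
  · rintro ⟨i, hpre, hleft, hright⟩
    have hlen : i ≤ text.length := by
      by_contra h
      have hd : text.drop i = [] := List.drop_eq_nil_of_le (by omega)
      rw [hd] at hpre
      exact hne (List.prefix_nil.mp hpre)
    obtain ⟨r, hr⟩ := hpre
    refine ⟨text.take i, r, ?_, ?_, ?_⟩
    · have h1 : text = text.take i ++ (term ++ r) := by rw [hr, List.take_append_drop]
      rw [List.append_assoc]; exact h1
    · intro c hc
      have hi : i ≠ 0 := by
        intro h0; subst h0; simp at hc
      rcases hleft with h0 | ⟨c', hc', hcal⟩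
      · exact absurd h0 hi
      · have hgl : (text.take i).getLast? = text[i-1]? := by
          rw [List.getLast?_eq_getElem?, List.length_take, List.getElem?_take]
          have hmin : min i text.length = i := by omega
          rw [hmin, if_pos (by omega : i - 1 < i)]
        rw [hgl, hc'] at hc
        injection hc with hc2
        rw [← hc2]; exact hcal
    · intro c hc
      have hr' : r = text.drop (i + term.length) := by
        have h2 := congrArg (List.drop term.length) hr
        rw [List.drop_left, List.drop_drop] at h2
        exact h2
      rcases hright with hlen2 | ⟨c', hc', hcal⟩
      · have hrn : r = [] := by rw [hr']; exact List.drop_eq_nil_of_le (by omega)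
        rw [hrn] at hc; simp at hc
      · rw [hr', List.head?_drop, hc'] at hc
        injection hc with hc2
        rw [← hc2]; exact hcal
  · rintro ⟨l, r, rfl, hl, hr⟩
    refine ⟨l.length, ?_, ?_, ?_⟩
    · rw [List.append_assoc, List.drop_left]; exact ⟨r, rfl⟩
    · rcases pv_eq_nil_or_append l with rfl | ⟨l', a, rfl⟩
      · exact Or.inl rfl
      · right
        refine ⟨a, ?_, hl a List.getLast?_concat⟩
        rw [List.append_assoc, List.getElem?_append_left (by simp)]
        simp
    · rcases r with _ | ⟨c, tl⟩
      · left; simp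
      · right
        refine ⟨c, ?_, hr c rfl⟩
        rw [List.getElem?_append_right (by simp)]
        simp

theorem pvTokens_iff_pvOcc (term : List Char) (hne : term ≠ [])
    (halnum : term.all PySem.Chars.isalnum = true) :
    ∀ (cs run : List Char), run.all PySem.Chars.isalnum = true →
      (term ∈ pvTokens run cs ↔ pvOcc term (run ++ cs)) := by
  have htermal : ∀ c ∈ term, PySem.Chars.isalnum c = true := List.all_eq_true.mp halnum
  intro cs
  induction cs with
  | nil =>
    intro run hrun
    have hrunal : ∀ c ∈ run, PySem.Chars.isalnum c = true := List.all_eq_true.mp hrun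
    simp only [pvTokens, List.append_nil]
    constructor
    · intro h
      have hteq : term = run := by
        by_cases hr0 : run = []
        · rw [hr0] at h; simp at h
        · rw [if_neg hr0] at h; simpa using h
      subst hteq
      exact ⟨[], [], by simp, by simp, by simp⟩
    · rintro ⟨l, r, heq, hl, hr⟩
      have hlnil : l = [] := by
        rcases pv_eq_nil_or_append l with rfl | ⟨l', a, rfl⟩
        · rfl
        · exfalso
          have ha : PySem.Chars.isalnum a = false := hl a List.getLast?_concat
          have hmem : a ∈ run := by rw [heq]; simp
          rw [hrunal a hmem] at ha; cases ha
      have hrnil : r = [] := by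
        rcases r with _ | ⟨c, tl⟩
        · rfl
        · exfalso
          have hc : PySem.Chars.isalnum c = false := hr c rfl
          have hmem : c ∈ run := by rw [heq]; simp
          rw [hrunal c hmem] at hc; cases hc
      subst hlnil; subst hrnil
      simp only [List.nil_append, List.append_nil] at heq
      rw [if_neg (by rw [heq]; exact hne)]
      simp [heq]
  | cons c cs ihcs =>
    intro run hrun
    have hrunal : ∀ d ∈ run, PySem.Chars.isalnum d = true := List.all_eq_true.mp hrun
    by_cases hc : PySem.Chars.isalnum c = true
    · simp only [pvTokens, hc, if_true]
      rw [ihcs (run ++ [c]) (by simp [List.all_append, hrun, hc])]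
      have hassoc : (run ++ [c]) ++ cs = run ++ (c :: cs) := by simp
      rw [hassoc]
    · have hcf : PySem.Chars.isalnum c = false := by
        cases hb : PySem.Chars.isalnum c
        · rfl
        · exact absurd hb hc
      simp only [pvTokens, hcf, Bool.false_eq_true, if_false, List.mem_append]
      rw [ihcs [] rfl]
      simp only [List.nil_append]
      constructor
      · rintro (hterm_run | hocc)
        · have hteq : term = run := by
            by_cases hr0 : run = []
            · rw [hr0] at hterm_run; simp at hterm_run
            · rw [if_neg hr0] at hterm_run; simpa using hterm_run
          subst hteq
          refine ⟨[], c :: cs, by simp, by simp, ?_⟩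
          intro d hd
          simp only [List.head?_cons, Option.some.injEq] at hd
          rw [← hd]; exact hcf
        · obtain ⟨l, r, heq, hl, hr⟩ := hocc
          refine ⟨run ++ c :: l, r, by rw [heq]; simp, ?_, hr⟩
          intro d hd
          rcases pv_eq_nil_or_append l with rfl | ⟨l', a, rfl⟩
          · rw [show run ++ c :: ([] : List Char) = run ++ [c] from rfl,
               List.getLast?_concat] at hd
            injection hd with hd2
            rw [← hd2]; exact hcf
          · rw [show run ++ c :: (l' ++ [a]) = (run ++ c :: l') ++ [a] by simp,
               List.getLast?_concat] at hd
            injection hd with hd2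
            rw [← hd2]; exact hl a List.getLast?_concat
      · rintro ⟨l, r, heq, hl, hr⟩
        rw [List.append_assoc] at heq
        rcases List.append_eq_append_iff.mp heq with ⟨a, ha1, ha2⟩ | ⟨b, hb1, hb2⟩
        · -- l = run ++ a, c :: cs = a ++ (term ++ r)
          rcases a with _ | ⟨a0, a'⟩
          · exfalso
            rcases term with _ | ⟨t0, ts⟩
            · exact hne rfl
            · rw [List.nil_append] at ha2
              injection ha2 with h1 h2
              have := htermal t0 (by simp)
              rw [← h1, hcf] at this; cases this
          · rw [List.cons_append] at ha2
            injection ha2 with h1 hcs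
            subst h1
            right
            rw [← List.append_assoc] at hcs
            refine ⟨a', r, hcs, ?_, hr⟩
            intro d hd
            rcases pv_eq_nil_or_append a' with rfl | ⟨a'', z, rfl⟩
            · simp at hd
            · rw [List.getLast?_concat] at hd
              apply hl d
              rw [ha1, show run ++ c :: (a'' ++ [z]) = (run ++ c :: a'') ++ [z] by simp,
                 List.getLast?_concat]
              exact hd
        · -- run = l ++ b, term ++ r = b ++ (c :: cs)
          rcases List.append_eq_append_iff.mp hb2 with ⟨u, hu1, hu2⟩ | ⟨v, hv1, hv2⟩
          · -- b = term ++ u, r = u ++ c :: cs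
            left
            have hu0 : u = [] := by
              rcases u with _ | ⟨u0, u''⟩
              · rfl
              · exfalso
                have hh : PySem.Chars.isalnum u0 = false := hr u0 (by rw [hu2]; rfl)
                have hmem : u0 ∈ run := by rw [hb1, hu1]; simp
                rw [hrunal u0 hmem] at hh; cases hh
            have hl0 : l = [] := by
              rcases pv_eq_nil_or_append l with rfl | ⟨l', a, rfl⟩
              · rfl
              · exfalso
                have hh : PySem.Chars.isalnum a = false := hl a List.getLast?_concat
                have hmem : a ∈ run := by rw [hb1]; simp
                rw [hrunal a hmem] at hh; cases hh
            have hteq : run = term := by rw [hb1, hu1, hu0, hl0]; simp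
            rw [if_neg (by rw [hteq]; exact hne)]
            simp [hteq]
          · -- term = b ++ v, c :: cs = v ++ r
            rcases v with _ | ⟨v0, v'⟩
            · -- term = b, r = c :: cs
              left
              have hl0 : l = [] := by
                rcases pv_eq_nil_or_append l with rfl | ⟨l', a, rfl⟩
                · rfl
                · exfalso
                  have hh : PySem.Chars.isalnum a = false := hl a List.getLast?_concat
                  have hmem : a ∈ run := by rw [hb1]; simp
                  rw [hrunal a hmem] at hh; cases hh
              have hb' : b = term := by simpa using hv1.symm
              have hteq : run = term := by rw [hb1, hl0, hb']; simp
              rw [if_neg (by rw [hteq]; exact hne)]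
              simp [hteq]
            · exfalso
              rw [List.cons_append] at hv2
              injection hv2 with h1 h2
              have := htermal v0 (by rw [hv1]; simp)
              rw [← h1, hcf] at this; cases this

-- port-shaped boundary tests against the pvOccAt conditions
theorem pvLeft_iff (text : List Char) (m : Nat) (hm : m < text.length) :
    (pvIsalnumOpt (if (0:Int) < (m:Int) then PySem.List.pyGet? text ((m:Int) - 1) else none) = false)
    ↔ (m = 0 ∨ ∃ c, text[m-1]? = some c ∧ PySem.Chars.isalnum c = false) := by
  rcases m with _ | m'
  · simp [pvIsalnumOpt]
  · have h2 : (0:Int) < ((m'+1:Nat):Int) := by exact_mod_cast Nat.succ_pos m'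
    have h1 : ((m'+1 : Nat):Int) - 1 = ((m' : Nat):Int) := by push_cast; ring
    have h3 : m' < text.length := by omega
    rw [if_pos h2, h1, PySem.List.pyGet?_natCast, List.getElem?_eq_getElem h3]
    simp only [pvIsalnumOpt, Nat.add_sub_cancel, Nat.succ_ne_zero, false_or,
      List.getElem?_eq_getElem h3, Option.some.injEq]
    constructor
    · intro h; exact ⟨text[m'], rfl, h⟩
    · rintro ⟨c, hc, hcal⟩
      rw [hc]; exact hcal

theorem pvRight_iff (text : List Char) (m tl : Nat) :
    (pvIsalnumOpt (if (m:Int) + (tl:Int) < ((text.length:Nat):Int)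
        then PySem.List.pyGet? text ((m:Int) + (tl:Int)) else none) = false)
    ↔ (text.length ≤ m + tl ∨ ∃ c, text[m + tl]? = some c ∧ PySem.Chars.isalnum c = false) := by
  have hcast : (m:Int) + (tl:Int) = ((m + tl : Nat) : Int) := by push_cast; ring
  rw [hcast]
  by_cases hj : m + tl < text.length
  · rw [if_pos (by exact_mod_cast hj), PySem.List.pyGet?_natCast, List.getElem?_eq_getElem hj]
    simp only [pvIsalnumOpt, Option.some.injEq]
    constructor
    · intro h; exact Or.inr ⟨text[m + tl], rfl, h⟩
    · rintro (h | ⟨c, hc, hcal⟩)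
      · omega
      · rw [hc]; exact hcal
  · rw [if_neg (by exact_mod_cast hj)]
    simp only [pvIsalnumOpt]
    constructor
    · intro _; exact Or.inl (by omega)
    · intro _; trivial

-- the whole boundary test of one loop round, as A's port computes it
theorem pvBoundary_iff (text term : List Char) (m : Nat) (hmlen : m < text.length) :
    ((!pvIsalnumOpt (if (0:Int) < (m:Int) then PySem.List.pyGet? text ((m:Int) - 1) else none) &&
      !pvIsalnumOpt (if (m:Int) + ((term.length:Nat):Int) < ((text.length:Nat):Int)
          then PySem.List.pyGet? text ((m:Int) + ((term.length:Nat):Int)) else none)) = true)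
    ↔ ((m = 0 ∨ ∃ c, text[m-1]? = some c ∧ PySem.Chars.isalnum c = false) ∧
       (text.length ≤ m + term.length ∨
         ∃ c, text[m + term.length]? = some c ∧ PySem.Chars.isalnum c = false)) := by
  rw [Bool.and_eq_true, Bool.not_eq_true', Bool.not_eq_true',
      pvLeft_iff text m hmlen, pvRight_iff text m term.length]

theorem pvContainsGo_iff (text term : List Char) (hne : term ≠ []) :
    ∀ (fuel k : Nat), k ≤ text.length → text.length + 1 ≤ fuel + k →
      (pvContainsGo text term fuel (k : Int) = true ↔ ∃ i, k ≤ i ∧ pvOccAt term text i) := by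
  intro fuel
  induction fuel with
  | zero =>
    intro k hk hfuel
    exfalso; omega
  | succ fuel ih =>
    intro k hk hfuel
    by_cases hneg : PySem.Chars.findFrom text term (k:Int) none = -1
    · have hnotin := (PySem.Chars.findFrom_natCast_eq_neg_one_iff text term k hk).mp hneg
      simp only [pvContainsGo, hneg]
      rw [if_pos (by norm_num : (-1:Int) < 0)]
      constructor
      · intro h; simp at h
      · rintro ⟨i, hki, hpre, -, -⟩
        exfalso; apply hnotin
        have h2 : text.drop i = (text.drop k).drop (i - k) := by
          rw [List.drop_drop]; congr 1; omega
        rw [h2] at hpre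
        exact hpre.isInfix.trans (List.drop_suffix (i - k) (text.drop k)).isInfix
    · obtain ⟨hkle, hpre, hmin⟩ := PySem.Chars.findFrom_natCast_spec text term k hk hneg
      have hn0 : (0:Int) ≤ PySem.Chars.findFrom text term (k:Int) none :=
        le_trans (Int.natCast_nonneg k) hkle
      set m := (PySem.Chars.findFrom text term (k:Int) none).toNat with hm
      have hfind : PySem.Chars.findFrom text term (k:Int) none = ((m:Nat):Int) :=
        (Int.toNat_of_nonneg hn0).symm
      have hkm : k ≤ m := by
        have h := hkle; rw [hfind] at h; exact_mod_cast h
      have ht1 : 0 < term.length := List.length_pos_of_ne_nil hne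
      have hdlen := hpre.length_le
      rw [List.length_drop] at hdlen
      have hmlen : m < text.length := by omega
      simp only [pvContainsGo, hfind]
      rw [if_neg (by omega : ¬ (((m:Nat):Int) < 0))]
      by_cases hB : ((m = 0 ∨ ∃ c, text[m-1]? = some c ∧ PySem.Chars.isalnum c = false) ∧
          (text.length ≤ m + term.length ∨
            ∃ c, text[m + term.length]? = some c ∧ PySem.Chars.isalnum c = false))
      · rw [if_pos ((pvBoundary_iff text term m hmlen).mpr hB)]
        constructor
        · intro _; exact ⟨m, hkm, hpre, hB.1, hB.2⟩
        · intro _; rfl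
      · rw [if_neg (fun hc => hB ((pvBoundary_iff text term m hmlen).mp hc))]
        have hstep : ((m:Nat):Int) + 1 = (((m+1 : Nat)):Int) := by push_cast; ring
        rw [hstep, ih (m+1) (by omega) (by omega)]
        constructor
        · rintro ⟨i, hmi, hocc⟩
          exact ⟨i, by omega, hocc⟩
        · rintro ⟨i, hki2, hocc⟩
          rcases Nat.lt_trichotomy i m with hlt | heqm | hgt
          · exact absurd hocc.1 (hmin i hki2 hlt)
          · subst heqm
            exact absurd ⟨hocc.2.1, hocc.2.2⟩ hB
          · exact ⟨i, by omega, hocc⟩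

-- per fragment: A's boundary matcher decides exactly token membership (term a nonempty alnum word)
theorem pvContainsAsciiTerm_iff_token (text term : String) (hne : term.toList ≠ [])
    (halnum : term.toList.all PySem.Chars.isalnum = true) :
    (pvContainsAsciiTerm text term = true ↔ term.toList ∈ pvTokens [] text.toList) := by
  unfold pvContainsAsciiTerm
  have hiff := pvContainsGo_iff text.toList term.toList hne (text.toList.length + 2) 0
    (Nat.zero_le _) (by omega)
  rw [Nat.cast_zero] at hiff
  rw [hiff, pvTokens_iff_pvOcc term.toList hne halnum text.toList [] rfl]
  rw [List.nil_append, ← pvOccAt_iff_pvOcc term.toList text.toList hne]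
  constructor
  · rintro ⟨i, -, hocc⟩; exact ⟨i, hocc⟩
  · rintro ⟨i, hocc⟩; exact ⟨i, Nat.zero_le i, hocc⟩

-- membership in the word set built by Source B's char fold, against the pvTokens spec
theorem pv_mem_wordFold (cs : List Char) :
    ∀ (words : PySem.Set String) (run : List Char) (x : String),
      (x ∈ (if (cs.foldl pvWordStep (words, run)).2.isEmpty
            then (cs.foldl pvWordStep (words, run)).1
            else PySem.Set.add (cs.foldl pvWordStep (words, run)).1
                   (String.ofList (cs.foldl pvWordStep (words, run)).2)))
      ↔ x ∈ words ∨ ∃ t ∈ pvTokens run cs, String.ofList t = x := by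
  induction cs with
  | nil =>
    intro words run x
    simp only [List.foldl_nil, pvTokens]
    rcases run with _ | ⟨r0, rs⟩
    · simp
    · simp only [List.isEmpty_cons, if_neg (List.cons_ne_nil r0 rs), Bool.false_eq_true,
        if_false, PySem.Set.mem_add, List.mem_singleton]
      constructor
      · rintro (hw | hx)
        · exact Or.inl hw
        · exact Or.inr ⟨r0 :: rs, rfl, hx.symm⟩
      · rintro (hw | ⟨t, rfl, hx⟩)
        · exact Or.inl hw
        · exact Or.inr hx.symm
  | cons c cs ih =>
    intro words run x
    simp only [List.foldl_cons]
    by_cases hc : PySem.Chars.isalnum c = true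
    · rw [show pvWordStep (words, run) c = (words, run ++ [c]) by simp [pvWordStep, hc]]
      rw [ih words (run ++ [c]) x]
      simp only [pvTokens, hc, if_true]
    · have hcf : PySem.Chars.isalnum c = false := by
        cases hb : PySem.Chars.isalnum c
        · rfl
        · exact absurd hb hc
      rcases run with _ | ⟨r0, rs⟩
      · rw [show pvWordStep (words, ([] : List Char)) c = (words, []) by
            simp [pvWordStep, hcf]]
        rw [ih words [] x]
        simp [pvTokens, hcf]
      · rw [show pvWordStep (words, r0 :: rs) c
              = (PySem.Set.add words (String.ofList (r0 :: rs)), []) by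
            simp [pvWordStep, hcf]]
        rw [ih (PySem.Set.add words (String.ofList (r0 :: rs))) [] x]
        simp only [pvTokens, hcf, Bool.false_eq_true, if_false,
          if_neg (List.cons_ne_nil r0 rs), PySem.Set.mem_add, List.mem_append,
          List.mem_singleton]
        constructor
        · rintro ((hw | hx) | ⟨t, ht, hx⟩)
          · exact Or.inl hw
          · exact Or.inr ⟨r0 :: rs, Or.inl rfl, hx.symm⟩
          · exact Or.inr ⟨t, Or.inr ht, hx⟩
        · rintro (hw | ⟨t, ht | ht, hx⟩)
          · exact Or.inl (Or.inl hw)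
          · subst ht; exact Or.inl (Or.inr hx.symm)
          · exact Or.inr ⟨t, ht, hx⟩

theorem pv_mem_wordsOfLow (words : PySem.Set String) (low : String) (x : String) :
    x ∈ pvWordsOfLow words low ↔ x ∈ words ∨ ∃ t ∈ pvTokens [] low.toList, String.ofList t = x := by
  unfold pvWordsOfLow
  exact pv_mem_wordFold low.toList words [] x

theorem pv_mem_wordSet_aux (lows : List String) :
    ∀ (acc : PySem.Set String) (x : String),
      x ∈ lows.foldl pvWordsOfLow acc
        ↔ x ∈ acc ∨ ∃ low ∈ lows, ∃ t ∈ pvTokens [] low.toList, String.ofList t = x := by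
  induction lows with
  | nil => intro acc x; simp
  | cons low rest ih =>
    intro acc x
    rw [List.foldl_cons, ih (pvWordsOfLow acc low) x, pv_mem_wordsOfLow]
    constructor
    · rintro ((ha | ⟨t, h1, h2⟩) | ⟨l2, hl2, t, h1, h2⟩)
      · exact Or.inl ha
      · exact Or.inr ⟨low, by simp, t, h1, h2⟩
      · exact Or.inr ⟨l2, List.mem_cons_of_mem _ hl2, t, h1, h2⟩
    · rintro (ha | ⟨l2, hl2, t, h1, h2⟩)
      · exact Or.inl (Or.inl ha)
      · rcases List.mem_cons.mp hl2 with rfl | h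
        · exact Or.inl (Or.inr ⟨t, h1, h2⟩)
        · exact Or.inr ⟨l2, h, t, h1, h2⟩

theorem pv_mem_wordSet (lows : List String) (x : String) :
    x ∈ pvWordSet lows ↔ ∃ low ∈ lows, ∃ t ∈ pvTokens [] low.toList, String.ofList t = x := by
  unfold pvWordSet
  rw [pv_mem_wordSet_aux lows PySem.Set.empty x]
  simp [PySem.Set.empty]

-- A's inner fragment loop is an 'any'
theorem pvInnerA_eq_any (needle nneedle : String) (frags : List String) :
    pvInnerA needle nneedle frags
      = frags.any (fun f =>
          if pvIsAscii needle then pvContainsAsciiTerm (PySem.Str.lower f) nneedle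
          else PySem.Str.isIn nneedle (PySem.Str.lower f)) := by
  induction frags with
  | nil => rfl
  | cons f rest ih =>
    simp only [pvInnerA, List.any_cons]
    by_cases h : pvIsAscii needle = true <;> simp [h, ih]

-- ascii word-like needle: 'some fragment has a boundary hit' = 'needle is in the word set'
theorem pv_any_contains_eq (frags : List String) (nn : String) (hne : nn.toList ≠ [])
    (halnum : nn.toList.all PySem.Chars.isalnum = true) :
    frags.any (fun f => pvContainsAsciiTerm (PySem.Str.lower f) nn)
      = PySem.Set.contains (pvWordSet (frags.map PySem.Str.lower)) nn := by
  rw [Bool.eq_iff_iff, List.any_eq_true, PySem.Set.contains_iff, pv_mem_wordSet]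
  constructor
  · rintro ⟨f, hf, hcont⟩
    exact ⟨PySem.Str.lower f, List.mem_map.mpr ⟨f, hf, rfl⟩, nn.toList,
      (pvContainsAsciiTerm_iff_token (PySem.Str.lower f) nn hne halnum).mp hcont,
      String.ofList_toList⟩
  · rintro ⟨low, hlow, t, ht, hts⟩
    obtain ⟨f, hf, rfl⟩ := List.mem_map.mp hlow
    have hteq : t = nn.toList := by
      have h := congrArg String.toList hts
      rwa [String.toList_ofList] at h
    subst hteq
    exact ⟨f, hf, (pvContainsAsciiTerm_iff_token (PySem.Str.lower f) nn hne halnum).mpr ht⟩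

-- the ASCII needles of the config are nonempty alphanumeric words (after lowercasing)
theorem pv_ascii_needles :
    ∀ dn ∈ pvForbiddenTerms, pvIsAscii dn.2 = true →
      (PySem.Str.lower dn.2).toList ≠ [] ∧
        (PySem.Str.lower dn.2).toList.all PySem.Chars.isalnum = true := by
  decide

theorem find_matched_terms_eq (fragments : List String) :
    find_matched_terms_py fragments = find_matched_terms_py_alt fragments := by
  simp only [find_matched_terms_py, find_matched_terms_py_alt]
  rw [PySem.List.foldl_append_if]
  simp only [List.nil_append]
  congr 1
  apply List.filter_congr
  intro dn hdn
  rw [pvInnerA_eq_any]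
  by_cases ha : pvIsAscii dn.2 = true
  · simp only [ha, if_true]
    exact pv_any_contains_eq fragments (PySem.Str.lower dn.2)
      (pv_ascii_needles dn hdn ha).1 (pv_ascii_needles dn hdn ha).2
  · simp only [ha, Bool.false_eq_true, if_false]
    rw [List.any_map]
    rfl

-- ===== VERDICT (by name: the statement is the Claim_ definition above) =====
theorem find_matched_terms_py_spec : Claim_equal_find_matched_terms_py := by
  intro fragments _
  exact find_matched_terms_eq fragments
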